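-- pv_equiv track=rewrite | github.com/tmnewt/hacker-rank-python-work | Comps/HTI V/newKeyboard.py | receivedText
-- ===== SOURCE A (Python) =====
-- def receivedText(s: str):
--     result = ''
--     digits = ['1', '2', '3', '4', '5', '6', '7', '8', '9', '0']
--     numlock = True
--     home = False  # true if the home button has been hit. stays true until end is hit
--     appendix = 0
--     for i in s:
--         if i == '#':
--             numlock = not numlock
--
--         elif i == '<':
--             home = True
--             appendix = 0
--
--         elif i == '>':
--             home = False
--
--         elif i == '*':
--             try:
--                 if home:
--                     if appendix != 0:
--                         if appendix == 1:
--                             result = result[appendix:]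
--                             appendix -= 1
--                         else:
--                             temp = result[:appendix-1]
--                             result = temp + result[appendix:]
--                             appendix -= 1
--
--                 else:
--                     result = result[:-1]
--
--             except: pass
--
--         elif (numlock == True) and (i in digits):
--             if home:
--                 if appendix == 0:
--                     result = i + result
--                     appendix += 1
--                 else:
--
--                     result = result[:appendix] + i + result[appendix:]
--                     appendix += 1
--             else:
--                 result = result + i
--
--         elif i not in digits:
--             if home:
--                 if appendix == 0:
--                     result = i + result
--                     appendix += 1
--                 else:
--                     temp = result[:appendix] + i
--                     result = temp + result[appendix:]
--                     appendix += 1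
--             else:
--                 result = result + i
--     return result
-- ===== SOURCE B (Python) =====
-- def receivedText(s: str):
--     # gap buffer: text left of the cursor and text right of the cursor; O(1) per edit
--     left = []
--     right = []
--     numlock = True
--     for c in s:
--         if c == '#':
--             numlock = not numlock
--         elif c == '<':
--             right = left + right
--             left = []
--         elif c == '>':
--             left = left + right
--             right = []
--         elif c == '*':
--             if left:
--                 left.pop()
--         elif c in '1234567890':
--             if numlock:
--                 left.append(c)
--         else:
--             left.append(c)
--     return ''.join(left) + ''.join(right)
-- ===== Notes on version B (the rewrite author's own statement) =====
-- stated objective: faster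
-- what changed: B replaces A's per-keystroke string slicing/concatenation around an integer cursor by a gap buffer (two lists holding the text left and right of the cursor), so typing and backspace are O(1) list operations instead of rebuilding the whole string.
import Mathlib
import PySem

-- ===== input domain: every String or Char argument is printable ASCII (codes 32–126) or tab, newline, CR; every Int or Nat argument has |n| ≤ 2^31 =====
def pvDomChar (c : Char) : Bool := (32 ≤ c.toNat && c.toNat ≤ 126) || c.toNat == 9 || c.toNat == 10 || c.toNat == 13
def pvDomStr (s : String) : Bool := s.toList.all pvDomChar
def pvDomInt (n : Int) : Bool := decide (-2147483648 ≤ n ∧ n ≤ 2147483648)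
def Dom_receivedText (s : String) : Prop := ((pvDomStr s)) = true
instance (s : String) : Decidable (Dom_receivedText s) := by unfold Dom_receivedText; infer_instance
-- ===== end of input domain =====

-- B replaces A's quadratic string-slicing cursor simulation by a gap buffer (text left/right of the cursor) with O(1) edits.

-- ===== PORT A =====
def pvDigitsA : List Char := ['1', '2', '3', '4', '5', '6', '7', '8', '9', '0']

-- state: (result, numlock, home, appendix)
def pvStepA (st : List Char × Bool × Bool × Int) (i : Char) : List Char × Bool × Bool × Int :=
  match st with
  | (result, numlock, home, appendix) =>
    if i = '#' then (result, !numlock, home, appendix)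
    else if i = '<' then (result, numlock, true, 0)
    else if i = '>' then (result, numlock, false, appendix)
    else if i = '*' then
      if home then
        if appendix ≠ 0 then
          if appendix = 1 then
            (PySem.List.slice result (some appendix) none, numlock, home, appendix - 1)
          else
            (PySem.List.slice result none (some (appendix - 1)) ++
               PySem.List.slice result (some appendix) none, numlock, home, appendix - 1)
        else st
      else (PySem.List.slice result none (some (-1)), numlock, home, appendix)
    else if numlock = true ∧ i ∈ pvDigitsA then
      if home then
        if appendix = 0 then (i :: result, numlock, home, appendix + 1)
        else (PySem.List.slice result none (some appendix) ++ i ::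
                PySem.List.slice result (some appendix) none, numlock, home, appendix + 1)
      else (result ++ [i], numlock, home, appendix)
    else if i ∉ pvDigitsA then
      if home then
        if appendix = 0 then (i :: result, numlock, home, appendix + 1)
        else (PySem.List.slice result none (some appendix) ++ i ::
                PySem.List.slice result (some appendix) none, numlock, home, appendix + 1)
      else (result ++ [i], numlock, home, appendix)
    else st

def receivedText (s : String) : String :=
  String.ofList (s.toList.foldl pvStepA ([], true, false, 0)).1

-- ===== PORT B =====
-- state: (left, right, numlock) — the text left and right of the cursor
def pvStepB (st : List Char × List Char × Bool) (c : Char) : List Char × List Char × Bool :=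
  match st with
  | (left, right, numlock) =>
    if c = '#' then (left, right, !numlock)
    else if c = '<' then ([], left ++ right, numlock)
    else if c = '>' then (left ++ right, [], numlock)
    else if c = '*' then
      if left.isEmpty then st else (left.dropLast, right, numlock)
    else if c ∈ ['1', '2', '3', '4', '5', '6', '7', '8', '9', '0'] then
      if numlock then (left ++ [c], right, numlock) else st
    else (left ++ [c], right, numlock)

def receivedText_alt (s : String) : String :=
  String.ofList ((s.toList.foldl pvStepB ([], [], true)).1 ++
             (s.toList.foldl pvStepB ([], [], true)).2.1)

-- ===== PRECONDITION & SPEC =====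
def Spec_receivedText (s : String) (out : String) : Prop := out = receivedText_alt s
instance (s : String) (out : String) : Decidable (Spec_receivedText s out) := by unfold Spec_receivedText; infer_instance

-- ===== CLAIM (what is proved, stated in full; the proofs are below) =====
def Claim_equal_receivedText : Prop := ∀ (s : String), Dom_receivedText s → Spec_receivedText s (receivedText s)

-- ===== LEMMAS AND PROOFS =====

-- the simulation invariant between A's state and B's state
def pvRel (a : List Char × Bool × Bool × Int) (b : List Char × List Char × Bool) : Prop :=
  a.2.1 = b.2.2 ∧
  (a.2.2.1 = true → a.2.2.2 = (b.1.length : Int) ∧ a.1 = b.1 ++ b.2.1) ∧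
  (a.2.2.1 = false → a.1 = b.1 ∧ b.2.1 = [])

-- insertion at the cursor: A's slice-splice equals B's push on the left stack
lemma pvInsert_eq (left right : List Char) (i : Char) :
    PySem.List.slice (left ++ right) none (some (left.length : Int)) ++ i ::
      PySem.List.slice (left ++ right) (some (left.length : Int)) none
    = (left ++ [i]) ++ right := by
  rw [PySem.List.slice_to _ (by positivity), PySem.List.slice_from _ (by positivity)]
  simp

-- backspace at the cursor (cursor position ≥ 2): A's two-slice splice equals dropLast on the left stack
lemma pvDelete_eq (left right : List Char) (h2 : 2 ≤ left.length) :
    PySem.List.slice (left ++ right) none (some ((left.length : Int) - 1)) ++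
      PySem.List.slice (left ++ right) (some (left.length : Int)) none
    = left.dropLast ++ right := by
  rw [PySem.List.slice_to _ (by omega), PySem.List.slice_from _ (by positivity)]
  have ht : ((left.length : Int) - 1).toNat = left.length - 1 := by omega
  simp [ht, List.take_append_of_le_length (by omega : left.length - 1 ≤ left.length),
        List.dropLast_eq_take]

lemma pvStep_rel (a : List Char × Bool × Bool × Int) (b : List Char × List Char × Bool)
    (h : pvRel a b) (i : Char) : pvRel (pvStepA a i) (pvStepB b i) := by
  obtain ⟨result, numlock, home, appendix⟩ := a
  obtain ⟨left, right, numlockB⟩ := b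
  obtain ⟨hn, h1, h2⟩ := h
  simp only at hn h1 h2
  subst hn
  by_cases hsh : i = '#'
  · subst hsh
    rw [show pvStepA (result, numlock, home, appendix) '#'
          = (result, !numlock, home, appendix) by simp [pvStepA],
        show pvStepB (left, right, numlock) '#' = (left, right, !numlock) by simp [pvStepB]]
    exact ⟨rfl, h1, h2⟩
  by_cases hlt : i = '<'
  · subst hlt
    rw [show pvStepA (result, numlock, home, appendix) '<'
          = (result, numlock, true, 0) by simp [pvStepA],
        show pvStepB (left, right, numlock) '<' = ([], left ++ right, numlock) by simp [pvStepB]]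
    refine ⟨rfl, ?_, ?_⟩ <;> intro hf
    · refine ⟨by simp, ?_⟩
      cases home with
      | true => exact (h1 rfl).2
      | false => obtain ⟨hr, he⟩ := h2 rfl; simp [hr, he]
    · simp at hf
  by_cases hgt : i = '>'
  · subst hgt
    rw [show pvStepA (result, numlock, home, appendix) '>'
          = (result, numlock, false, appendix) by simp [pvStepA],
        show pvStepB (left, right, numlock) '>' = (left ++ right, [], numlock) by simp [pvStepB]]
    refine ⟨rfl, ?_, ?_⟩ <;> intro hf
    · simp at hf
    · refine ⟨?_, rfl⟩
      cases home with
      | true => exact (h1 rfl).2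
      | false => obtain ⟨hr, he⟩ := h2 rfl; simp [hr, he]
  by_cases hst : i = '*'
  · subst hst
    cases home with
    | true =>
      obtain ⟨ha, hr⟩ := h1 rfl
      subst hr
      rcases hleft : left with _ | ⟨x, rest⟩
      · -- cursor at 0: both no-ops
        subst hleft
        simp only [List.length_nil, Nat.cast_zero] at ha
        subst ha
        rw [show pvStepA (([] : List Char) ++ right, numlock, true, 0) '*'
              = (([] : List Char) ++ right, numlock, true, 0) by simp [pvStepA],
            show pvStepB (([] : List Char), right, numlock) '*'
              = (([] : List Char), right, numlock) by simp [pvStepB]]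
        refine ⟨rfl, ?_, ?_⟩ <;> intro hf
        · exact ⟨by simp, rfl⟩
        · simp at hf
      · subst hleft
        by_cases hone : rest = []
        · -- cursor at 1: drop the single char left of the cursor
          subst hone
          simp only [List.length_cons, List.length_nil, Nat.zero_add, Nat.cast_one] at ha
          subst ha
          rw [show pvStepA ([x] ++ right, numlock, true, 1) '*'
                = (PySem.List.slice ([x] ++ right) (some 1) none, numlock, true, 0) by
              simp [pvStepA],
              show pvStepB ([x], right, numlock) '*' = (([] : List Char), right, numlock) by
              simp [pvStepB],
              PySem.List.slice_from _ (by omega : (0:Int) ≤ 1)]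
          refine ⟨rfl, ?_, ?_⟩ <;> intro hf
          · exact ⟨by simp, by simp⟩
          · simp at hf
        · -- cursor at ≥ 2
          have hlen : 2 ≤ (x :: rest).length := by
            cases rest with
            | nil => exact absurd rfl hone
            | cons y t => simp
          subst ha
          have hA : pvStepA ((x :: rest) ++ right, numlock, true, (((x :: rest).length : Nat) : Int)) '*'
              = (PySem.List.slice ((x :: rest) ++ right) none (some ((((x :: rest).length : Nat) : Int) - 1)) ++
                   PySem.List.slice ((x :: rest) ++ right) (some (((x :: rest).length : Nat) : Int)) none,
                 numlock, true, (((x :: rest).length : Nat) : Int) - 1) := by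
            have c0 : ¬(((x :: rest).length : Int) = 0) := by
              simp only [List.length_cons]; omega
            have c1 : ¬(((x :: rest).length : Int) = 1) := by
              simp only [List.length_cons]
              intro hc
              have hr1 : rest.length + 1 = 1 := by exact_mod_cast hc
              simp [List.length_eq_zero_iff] at hr1
              exact hone hr1
            simp only [pvStepA, c0, c1, if_neg (by decide : ¬('*' = '#')),
              if_neg (by decide : ¬('*' = '<')), if_neg (by decide : ¬('*' = '>')),
              if_true, ne_eq, not_false_iff, if_false]
          have hB : pvStepB ((x :: rest), right, numlock) '*'
              = ((x :: rest).dropLast, right, numlock) := by simp [pvStepB]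
          rw [hA, hB]
          refine ⟨rfl, ?_, ?_⟩ <;> intro hf
          · refine ⟨?_, pvDelete_eq _ _ hlen⟩
            simp only [List.length_dropLast, List.length_cons]
            omega
          · simp at hf
    | false =>
      obtain ⟨hr, he⟩ := h2 rfl
      subst hr; subst he
      rw [show pvStepA (result, numlock, false, appendix) '*'
            = (PySem.List.slice result none (some (-1)), numlock, false, appendix) by
          simp [pvStepA],
          PySem.List.slice_to_neg_one]
      rcases result with _ | ⟨x, rest⟩
      · rw [show pvStepB (([] : List Char), [], numlock) '*'
              = (([] : List Char), [], numlock) by simp [pvStepB]]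
        refine ⟨rfl, ?_, ?_⟩ <;> intro hf
        · simp at hf
        · exact ⟨rfl, rfl⟩
      · rw [show pvStepB ((x :: rest), [], numlock) '*'
              = ((x :: rest).dropLast, [], numlock) by simp [pvStepB]]
        refine ⟨rfl, ?_, ?_⟩ <;> intro hf
        · simp at hf
        · exact ⟨rfl, rfl⟩
  -- i is a typed character (digit or other): inserted at the cursor / appended
  have hins : pvRel
      (if home = true then
        (if appendix = 0 then (i :: result, numlock, home, appendix + 1)
         else (PySem.List.slice result none (some appendix) ++ i ::
                 PySem.List.slice result (some appendix) none, numlock, home, appendix + 1))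
       else (result ++ [i], numlock, home, appendix))
      ((left ++ [i]), right, numlock) := by
    cases home with
    | true =>
      obtain ⟨ha, hr⟩ := h1 rfl
      subst hr; subst ha
      rcases hleft : left with _ | ⟨x, rest⟩
      · subst hleft
        simp only [List.length_nil, Nat.cast_zero]
        refine ⟨rfl, ?_, ?_⟩ <;> intro hf
        · exact ⟨by simp, by simp⟩
        · simp at hf
      · have hne0 : ¬((left.length : Int) = 0) := by
          subst hleft; simp only [List.length_cons]; omega
        rw [← hleft]
        rw [if_pos rfl, if_neg hne0]
        refine ⟨rfl, ?_, ?_⟩ <;> intro hf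
        · refine ⟨by simp only [List.length_append, List.length_cons,
                                List.length_nil]; push_cast; ring, ?_⟩
          exact pvInsert_eq left right i
        · simp at hf
    | false =>
      obtain ⟨hr, he⟩ := h2 rfl
      subst hr; subst he
      rw [if_neg (by simp : ¬((false : Bool) = true))]
      refine ⟨rfl, ?_, ?_⟩ <;> intro hf
      · simp at hf
      · exact ⟨by simp, rfl⟩
  by_cases hdig : i ∈ pvDigitsA
  · cases numlock with
    | true =>
      rw [show pvStepA (result, true, home, appendix) i
            = (if home = true then
                (if appendix = 0 then (i :: result, true, home, appendix + 1)
                 else (PySem.List.slice result none (some appendix) ++ i ::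
                         PySem.List.slice result (some appendix) none, true, home, appendix + 1))
               else (result ++ [i], true, home, appendix)) by
          simp [pvStepA, hsh, hlt, hgt, hst, hdig],
          show pvStepB (left, right, true) i = ((left ++ [i]), right, true) by
          have hd : i ∈ (['1', '2', '3', '4', '5', '6', '7', '8', '9', '0'] : List Char) := hdig
          simp [pvStepB, hsh, hlt, hgt, hst, hd]]
      exact hins
    | false =>
      -- digit with numlock off: both are no-ops
      rw [show pvStepA (result, false, home, appendix) i = (result, false, home, appendix) by
          simp [pvStepA, hsh, hlt, hgt, hst, hdig],
          show pvStepB (left, right, false) i = (left, right, false) by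
          have hd : i ∈ (['1', '2', '3', '4', '5', '6', '7', '8', '9', '0'] : List Char) := hdig
          simp [pvStepB, hsh, hlt, hgt, hst, hd]]
      exact ⟨rfl, h1, h2⟩
  · rw [show pvStepA (result, numlock, home, appendix) i
          = (if home = true then
              (if appendix = 0 then (i :: result, numlock, home, appendix + 1)
               else (PySem.List.slice result none (some appendix) ++ i ::
                       PySem.List.slice result (some appendix) none, numlock, home, appendix + 1))
             else (result ++ [i], numlock, home, appendix)) by
        simp [pvStepA, hsh, hlt, hgt, hst, hdig],
        show pvStepB (left, right, numlock) i = ((left ++ [i]), right, numlock) by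
        have hd : i ∉ (['1', '2', '3', '4', '5', '6', '7', '8', '9', '0'] : List Char) := hdig
        simp [pvStepB, hsh, hlt, hgt, hst, hd]]
    exact hins

lemma pvFold_rel (l : List Char) (a : List Char × Bool × Bool × Int)
    (b : List Char × List Char × Bool) (h : pvRel a b) :
    pvRel (l.foldl pvStepA a) (l.foldl pvStepB b) := by
  induction l generalizing a b with
  | nil => exact h
  | cons x xs ih => exact ih _ _ (pvStep_rel a b h x)

-- ===== VERDICT (by name: the statement is the Claim_ definition above) =====
theorem receivedText_spec : Claim_equal_receivedText := by
  intro s _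
  unfold Spec_receivedText receivedText receivedText_alt
  have h0 : pvRel ([], true, false, 0) ([], [], true) := by simp [pvRel]
  have h := pvFold_rel s.toList ([], true, false, 0) ([], [], true) h0
  obtain ⟨-, h1, h2⟩ := h
  cases hh : (s.toList.foldl pvStepA ([], true, false, 0)).2.2.1 with
  | true => rw [(h1 hh).2]
  | false =>
    obtain ⟨e1, e2⟩ := h2 hh
    rw [e1, e2, List.append_nil]
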